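-- pv_equiv track=rewrite | github.com/Coffey333/mc-ai | src/standalone_music_generator.py | _generate_harmony
-- ===== SOURCE A (Python) =====
-- from typing import Dict, List, Optional, Tuple
--
-- def _generate_harmony(base_note: int, scale: List[int],
--                      progression: List[int], num_beats: int) -> List[List[int]]:
--     """Generate harmonic chords"""
--     harmony = []
--
--     beats_per_chord = max(1, num_beats // len(progression))
--
--     for chord_root in progression:
--         # Build triad
--         root = base_note + scale[chord_root % len(scale)]
--         third = root + scale[(chord_root + 2) % len(scale)]
--         fifth = root + scale[(chord_root + 4) % len(scale)]
--
--         chord = [root, third, fifth]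
--
--         # Repeat chord for duration
--         for _ in range(beats_per_chord):
--             harmony.append(chord)
--
--     # Fill remaining beats
--     while len(harmony) < num_beats:
--         harmony.append(harmony[-1])
--
--     return harmony[:num_beats]
-- ===== SOURCE B (Python) =====
-- from typing import List
--
--
-- def _generate_harmony(base_note: int, scale: List[int],
--                       progression: List[int], num_beats: int) -> List[List[int]]:
--     """Generate harmonic chords: precompute the triads, then index them per beat."""
--     beats_per_chord = max(1, num_beats // len(progression))
--     n = len(scale)
--     chords = []
--     for chord_root in progression:
--         root = base_note + scale[chord_root % n]
--         chords.append([root,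
--                        root + scale[(chord_root + 2) % n],
--                        root + scale[(chord_root + 4) % n]])
--     last = len(progression) - 1
--     return [chords[min(i // beats_per_chord, last)] for i in range(num_beats)]
-- ===== Notes on version B (the rewrite author's own statement) =====
-- stated objective: simpler
-- what changed: B precomputes the triad list once and builds the result in a single comprehension chords[min(i // beats_per_chord, last)] over range(num_beats), replacing A's append-loop, the fill-with-last-chord while loop and the final truncating slice.
-- intended difference: For negative num_beats with -num_beats < len(progression), A's trailing slice harmony[:num_beats] accidentally returns the first len(progression)+num_beats triads, while B returns [] — no beats requested should mean an empty harmony. — e.g. on _generate_harmony(0, [0], [0, 0], -1): A returns [[0, 0, 0]], B returns []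
import Mathlib
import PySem

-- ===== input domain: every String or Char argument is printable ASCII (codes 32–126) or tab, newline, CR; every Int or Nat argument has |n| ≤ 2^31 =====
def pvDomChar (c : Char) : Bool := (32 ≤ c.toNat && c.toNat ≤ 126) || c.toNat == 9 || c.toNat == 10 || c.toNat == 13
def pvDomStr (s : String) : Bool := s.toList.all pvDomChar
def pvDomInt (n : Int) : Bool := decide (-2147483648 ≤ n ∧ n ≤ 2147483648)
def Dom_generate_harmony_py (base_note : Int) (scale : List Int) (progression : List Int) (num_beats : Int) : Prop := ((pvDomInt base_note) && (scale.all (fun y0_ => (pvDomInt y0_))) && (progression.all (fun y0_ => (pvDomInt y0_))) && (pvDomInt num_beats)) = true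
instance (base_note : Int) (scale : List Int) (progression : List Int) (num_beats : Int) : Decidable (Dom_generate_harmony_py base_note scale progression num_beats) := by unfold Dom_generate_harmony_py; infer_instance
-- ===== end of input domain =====

-- B replaces A's append loop + fill-while + truncating slice by a precomputed triad list
-- indexed per beat (simpler, one pass); equivalence is about the return value only.

-- ===== PORT A =====
-- the 'while len(harmony) < num_beats: harmony.append(harmony[-1])' loop
def fillAGo : Nat → List (List Int) → List (List Int)
  | 0, h => h
  | k + 1, h => fillAGo k (h ++ [PySem.List.pyGetD h (-1) []])

-- each iteration appends exactly one element, so the loop runs (num_beats - len).toNat times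
def fillA (num_beats : Int) (h : List (List Int)) : List (List Int) :=
  fillAGo (num_beats - h.length).toNat h

def generate_harmony_py (base_note : Int) (scale : List Int) (progression : List Int) (num_beats : Int) : List (List Int) :=
  let beats_per_chord := max 1 (PySem.Int.floordiv num_beats (progression.length : Int))
  let harmony := progression.foldl (fun h chord_root =>
    let root := base_note + PySem.List.pyGetD scale (PySem.Int.mod chord_root (scale.length : Int)) 0
    let third := root + PySem.List.pyGetD scale (PySem.Int.mod (chord_root + 2) (scale.length : Int)) 0
    let fifth := root + PySem.List.pyGetD scale (PySem.Int.mod (chord_root + 4) (scale.length : Int)) 0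
    let chord := [root, third, fifth]
    (PySem.List.pyRange 0 beats_per_chord 1).foldl (fun h _ => h ++ [chord]) h) []
  PySem.List.slice (fillA num_beats harmony) none (some num_beats)

-- ===== PORT B =====
def triadB (base_note : Int) (scale : List Int) (chord_root : Int) : List Int :=
  let root := base_note + PySem.List.pyGetD scale (PySem.Int.mod chord_root (scale.length : Int)) 0
  [root,
   root + PySem.List.pyGetD scale (PySem.Int.mod (chord_root + 2) (scale.length : Int)) 0,
   root + PySem.List.pyGetD scale (PySem.Int.mod (chord_root + 4) (scale.length : Int)) 0]

def generate_harmony_py_alt (base_note : Int) (scale : List Int) (progression : List Int) (num_beats : Int) : List (List Int) :=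
  let beats_per_chord := max 1 (PySem.Int.floordiv num_beats (progression.length : Int))
  let chords := progression.map (triadB base_note scale)
  let last := (progression.length : Int) - 1
  (PySem.List.pyRange 0 num_beats 1).map (fun i =>
    PySem.List.pyGetD chords (min (PySem.Int.floordiv i beats_per_chord) last) [])

-- ===== PRECONDITION & SPEC =====
-- A raises ZeroDivisionError when progression = [] (num_beats // 0) or when scale = []
-- (chord_root % 0); Pre_ excludes exactly those inputs.
def Pre_generate_harmony_py (base_note : Int) (scale : List Int) (progression : List Int) (num_beats : Int) : Prop :=
  progression ≠ [] ∧ scale ≠ []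
instance (base_note : Int) (scale : List Int) (progression : List Int) (num_beats : Int) : Decidable (Pre_generate_harmony_py base_note scale progression num_beats) := by unfold Pre_generate_harmony_py; infer_instance

def pvWitness_generate_harmony_py : Int × List Int × List Int × Int := (60, [0, 2, 4, 5, 7, 9, 11], [0, 3, 4], 8)

-- For negative num_beats with -num_beats < len(progression), A's trailing slice harmony[:num_beats]
-- accidentally returns the first len(progression)+num_beats triads, while B returns [] — no beats
-- requested should mean an empty harmony.
def D_generate_harmony_py (base_note : Int) (scale : List Int) (progression : List Int) (num_beats : Int) : Prop :=
  num_beats < 0 ∧ -num_beats < (progression.length : Int)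
instance (base_note : Int) (scale : List Int) (progression : List Int) (num_beats : Int) : Decidable (D_generate_harmony_py base_note scale progression num_beats) := by unfold D_generate_harmony_py; infer_instance

def Spec_generate_harmony_py (base_note : Int) (scale : List Int) (progression : List Int) (num_beats : Int) (out : List (List Int)) : Prop := ¬ D_generate_harmony_py base_note scale progression num_beats → out = generate_harmony_py_alt base_note scale progression num_beats
instance (base_note : Int) (scale : List Int) (progression : List Int) (num_beats : Int) (out : List (List Int)) : Decidable (Spec_generate_harmony_py base_note scale progression num_beats out) := by unfold Spec_generate_harmony_py; infer_instance

def pvDiffWitness_generate_harmony_py : Int × List Int × List Int × Int := (0, [0], [0, 0], -1)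
def pvDiffWitnessOut_generate_harmony_py : (List (List Int)) × (List (List Int)) := ([[0, 0, 0]], [])

-- ===== CLAIM (what is proved, stated in full; the proofs are below) =====
def Claim_unchanged_generate_harmony_py : Prop := ∀ (base_note : Int) (scale : List Int) (progression : List Int) (num_beats : Int), Dom_generate_harmony_py base_note scale progression num_beats → Pre_generate_harmony_py base_note scale progression num_beats → Spec_generate_harmony_py base_note scale progression num_beats (generate_harmony_py base_note scale progression num_beats)
def Claim_changed_generate_harmony_py : Prop := Dom_generate_harmony_py (pvDiffWitness_generate_harmony_py.1) (pvDiffWitness_generate_harmony_py.2.1) (pvDiffWitness_generate_harmony_py.2.2.1) (pvDiffWitness_generate_harmony_py.2.2.2) ∧ Pre_generate_harmony_py (pvDiffWitness_generate_harmony_py.1) (pvDiffWitness_generate_harmony_py.2.1) (pvDiffWitness_generate_harmony_py.2.2.1) (pvDiffWitness_generate_harmony_py.2.2.2) ∧ D_generate_harmony_py (pvDiffWitness_generate_harmony_py.1) (pvDiffWitness_generate_harmony_py.2.1) (pvDiffWitness_generate_harmony_py.2.2.1) (pvDiffWitness_generate_harmony_py.2.2.2) ∧ generate_harmony_py (pvDiffWitness_generate_harmony_py.1)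 (pvDiffWitness_generate_harmony_py.2.1) (pvDiffWitness_generate_harmony_py.2.2.1) (pvDiffWitness_generate_harmony_py.2.2.2) = pvDiffWitnessOut_generate_harmony_py.1 ∧ generate_harmony_py_alt (pvDiffWitness_generate_harmony_py.1) (pvDiffWitness_generate_harmony_py.2.1) (pvDiffWitness_generate_harmony_py.2.2.1) (pvDiffWitness_generate_harmony_py.2.2.2) = pvDiffWitnessOut_generate_harmony_py.2 ∧ pvDiffWitnessOut_generate_harmony_py.1 ≠ pvDiffWitnessOut_generate_harmony_py.2
def Claim_exact_generate_harmony_py : Prop := ∀ (base_note : Int) (scale : List Int) (progression : List Int) (num_beats : Int), Dom_generate_harmony_py base_note scale progression num_beats → Pre_generate_harmony_py base_note scale progression num_beats → D_generate_harmony_py base_note scale progression num_beats → generate_harmony_py base_note scale progression num_beats ≠ generate_harmony_py_alt base_note scale progression num_beats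

-- ===== LEMMAS AND PROOFS =====

-- L1 inner loop
theorem L1 (b : Int) (c : List Int) (h0 : List (List Int)) :
    (PySem.List.pyRange 0 b 1).foldl (fun h _ => h ++ [c]) h0 = h0 ++ List.replicate b.toNat c := by
  have := PySem.List.foldl_append_singleton_eq_map (fun _ : Int => c) (PySem.List.pyRange 0 b 1) h0
  simpa [List.map_const', PySem.List.length_pyRange_one] using this

-- L2 body = flatMap

-- L2 body = flatMap
theorem L2 (base_note : Int) (scale : List Int) (b : Int) :
    ∀ (progression : List Int) (init : List (List Int)),
    progression.foldl (fun h chord_root =>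
      let root := base_note + PySem.List.pyGetD scale (PySem.Int.mod chord_root (scale.length : Int)) 0
      let third := root + PySem.List.pyGetD scale (PySem.Int.mod (chord_root + 2) (scale.length : Int)) 0
      let fifth := root + PySem.List.pyGetD scale (PySem.Int.mod (chord_root + 4) (scale.length : Int)) 0
      let chord := [root, third, fifth]
      (PySem.List.pyRange 0 b 1).foldl (fun h _ => h ++ [chord]) h) init
    = init ++ (progression.map (triadB base_note scale)).flatMap (fun c => List.replicate b.toNat c) := by
  intro progression
  induction progression with
  | nil => intro init; simp
  | cons r rs ih =>
    intro init
    rw [List.foldl_cons]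
    show rs.foldl _ ((PySem.List.pyRange 0 b 1).foldl (fun h _ => h ++ [triadB base_note scale r]) init) = _
    rw [ih, L1]
    simp [triadB]


-- length of flatMap replicate

-- length of flatMap replicate
theorem L3 (cs : List (List Int)) (m : Nat) :
    (cs.flatMap (fun c => List.replicate m c)).length = cs.length * m := by
  simp [List.length_flatMap, List.map_const', Nat.mul_comm]

-- A characterization, 0 <= num_beats

theorem L4 (m : Nat) (hm : 0 < m) : ∀ (cs : List (List Int)) (i : Nat), i < cs.length * m →
    (cs.flatMap (fun c => List.replicate m c)).getD i [] = cs.getD (i / m) [] := by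
  intro cs
  induction cs with
  | nil => intro i hi; simp at hi
  | cons c cstl ih =>
    intro i hi
    by_cases hlt : i < m
    · rw [List.flatMap_cons, List.getD_append _ _ _ i (by simpa using hlt),
        List.getD_replicate c hlt]
      simp [Nat.div_eq_of_lt hlt]
    · push_neg at hlt
      obtain ⟨j, rfl⟩ : ∃ j, i = j + m := ⟨i - m, by omega⟩
      rw [List.flatMap_cons, List.getD_append_right _ _ _ _ (by simpa using hlt)]
      simp only [List.length_replicate, Nat.add_sub_cancel]
      simp only [List.length_cons, Nat.succ_mul] at hi
      rw [ih j (by omega), Nat.add_div_right _ hm]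
      simp

theorem L5 : ∀ (k : Nat) (h : List (List Int)) (hne : h ≠ []),
    fillAGo k h = h ++ List.replicate k (h.getLast hne) := by
  intro k
  induction k with
  | zero => intro h hne; simp [fillAGo]
  | succ k ih =>
    intro h hne
    rw [fillAGo, PySem.List.pyGetD_neg_one _ _ hne, ih _ (by simp)]
    simp
    rw [← List.replicate_succ, List.replicate_succ']

-- A characterization, 0 <= num_beats
theorem A_char (base_note : Int) (scale : List Int) (progression : List Int) (num_beats : Int)
    (hp : progression ≠ []) (hn : 0 ≤ num_beats) :
    generate_harmony_py base_note scale progression num_beats =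
    (List.range num_beats.toNat).map (fun i =>
      (progression.map (triadB base_note scale)).getD
        (min (i / (max 1 (PySem.Int.floordiv num_beats (progression.length : Int))).toNat)
             (progression.length - 1)) []) := by
  simp only [generate_harmony_py]
  rw [L2, List.nil_append]
  set cs := progression.map (triadB base_note scale) with hcs
  set bpc := max 1 (PySem.Int.floordiv num_beats (progression.length : Int)) with hbpc
  have hb1 : 1 ≤ bpc := le_max_left _ _
  set m := bpc.toNat with hm
  have hm1 : 0 < m := by omega
  have hL : 0 < progression.length := List.length_pos_iff.mpr hp
  have hLc : cs.length = progression.length := by simp [hcs]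
  set body := cs.flatMap (fun c => List.replicate m c) with hbody
  have hblen : body.length = progression.length * m := by rw [hbody, L3, hLc]
  have hmul : cs.length * m = progression.length * m := by rw [hLc]
  have hpos : 0 < progression.length * m := Nat.mul_pos hL hm1
  have hbne : body ≠ [] := by
    intro h; rw [h] at hblen; simp only [List.length_nil] at hblen; omega
  rw [fillA, L5 _ _ hbne, PySem.List.slice_to _ hn]
  set lastc := body.getLast hbne with hlast
  have hlastc : lastc = cs.getD (progression.length - 1) [] := by
    rw [hlast, List.getLast_eq_getElem, ← List.getD_eq_getElem _ []]
    rw [hbody] at hblen ⊢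
    rw [L4 m hm1 cs _ (by omega)]
    congr 1
    rw [hblen]
    obtain ⟨l', hl'⟩ : ∃ l', progression.length = l' + 1 := ⟨progression.length - 1, by omega⟩
    obtain ⟨m', hm'⟩ : ∃ m'', m = m'' + 1 := ⟨m - 1, by omega⟩
    rw [hl', hm']
    have : (l' + 1) * (m' + 1) - 1 = m' + l' * (m' + 1) := by ring_nf; omega
    rw [this, Nat.add_mul_div_right _ _ (by omega), Nat.div_eq_of_lt (by omega)]
    omega
  set k := (num_beats - (body.length : Int)).toNat with hk
  apply List.ext_getElem
  · simp only [List.length_take, List.length_append, List.length_replicate, List.length_map,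
      List.length_range, hblen, hk]
    omega
  · intro i h1 h2
    simp only [List.getElem_take, List.getElem_map, List.getElem_range]
    simp only [List.length_take, List.length_append, List.length_replicate] at h1
    by_cases hcase : i < body.length
    · rw [List.getElem_append_left hcase, ← List.getD_eq_getElem _ [] hcase]
      rw [hbody, L4 m hm1 cs i (by omega)]
      congr 1
      have : i / m < progression.length := by
        rw [Nat.div_lt_iff_lt_mul hm1]; omega
      omega
    · push_neg at hcase
      rw [List.getElem_append_right hcase, List.getElem_replicate, hlastc]
      congr 1
      have : progression.length ≤ i / m := by
        rw [Nat.le_div_iff_mul_le hm1]; omega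
      omega

-- B characterization, 0 ≤ num_beats

-- B characterization, 0 ≤ num_beats
theorem B_char (base_note : Int) (scale : List Int) (progression : List Int) (num_beats : Int)
    (hp : progression ≠ []) (hn : 0 ≤ num_beats) :
    generate_harmony_py_alt base_note scale progression num_beats =
    (List.range num_beats.toNat).map (fun i =>
      (progression.map (triadB base_note scale)).getD
        (min (i / (max 1 (PySem.Int.floordiv num_beats (progression.length : Int))).toNat)
             (progression.length - 1)) []) := by
  have hL : 0 < progression.length := List.length_pos_iff.mpr hp
  set bpc := max 1 (PySem.Int.floordiv num_beats (progression.length : Int)) with hbpc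
  have hb1 : 1 ≤ bpc := le_max_left _ _
  have hbm : bpc = (bpc.toNat : Int) := by omega
  unfold generate_harmony_py_alt
  rw [← hbpc, PySem.List.pyRange_one, List.map_map]
  simp only [Int.sub_zero]
  apply List.map_congr_left
  intro i hi
  simp only [Function.comp_apply, Int.zero_add]
  rw [hbm, PySem.Int.floordiv_natCast]
  have hmin : min ((i / bpc.toNat : Nat) : Int) ((progression.length : Int) - 1)
      = ((min (i / bpc.toNat) (progression.length - 1) : Nat) : Int) := by
    omega
  rw [hmin, PySem.List.pyGetD_natCast]
  simp only [Int.toNat_natCast]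

-- A characterization, num_beats < 0

-- A characterization, num_beats < 0
theorem A_char_neg (base_note : Int) (scale : List Int) (progression : List Int) (num_beats : Int)
    (hp : progression ≠ []) (hn : num_beats < 0) :
    generate_harmony_py base_note scale progression num_beats =
    (progression.map (triadB base_note scale)).take
      (progression.length - (-num_beats).toNat) := by
  have hL : 0 < progression.length := List.length_pos_iff.mpr hp
  have hLi : (0:Int) < (progression.length : Int) := by exact_mod_cast hL
  have hflt : PySem.Int.floordiv num_beats (progression.length : Int) < 1 :=
    (PySem.Int.floordiv_lt_iff_lt_mul hLi).mpr (by omega)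
  have hbpc : max 1 (PySem.Int.floordiv num_beats (progression.length : Int)) = 1 := by omega
  simp only [generate_harmony_py]
  rw [L2]
  rw [hbpc]
  have hrep : (progression.map (triadB base_note scale)).flatMap
      (fun c => List.replicate (1:Int).toNat c) = progression.map (triadB base_note scale) := by
    simp [List.replicate_one]
  rw [List.nil_append, hrep]
  set cs := progression.map (triadB base_note scale) with hcs
  have hcl : cs.length = progression.length := by simp [hcs]
  have hfill : fillA num_beats cs = cs := by
    rw [fillA, show (num_beats - (cs.length : Int)).toNat = 0 from by omega]
    rfl
  rw [hfill]
  obtain ⟨k, hk⟩ : ∃ k : Nat, num_beats = -(k : Int) := ⟨(-num_beats).toNat, by omega⟩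
  rw [hk, PySem.List.slice_to_neg_natCast _ _ (by omega), hcl]
  congr 1
  omega

-- B is empty when num_beats < 0

-- B is empty when num_beats < 0
theorem B_neg (base_note : Int) (scale : List Int) (progression : List Int) (num_beats : Int)
    (hn : num_beats < 0) :
    generate_harmony_py_alt base_note scale progression num_beats = [] := by
  unfold generate_harmony_py_alt
  rw [PySem.List.pyRange_one_eq_nil (by omega)]
  rfl

theorem main_eq (base_note : Int) (scale : List Int) (progression : List Int) (num_beats : Int)
    (hp : progression ≠ [])
    (hnd : ¬ (num_beats < 0 ∧ -num_beats < (progression.length : Int))) :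
    generate_harmony_py base_note scale progression num_beats =
    generate_harmony_py_alt base_note scale progression num_beats := by
  by_cases hn : 0 ≤ num_beats
  · rw [A_char _ _ _ _ hp hn, B_char _ _ _ _ hp hn]
  · push_neg at hn
    rw [A_char_neg _ _ _ _ hp hn, B_neg _ _ _ _ hn,
      show progression.length - (-num_beats).toNat = 0 from by
        have : (progression.length : Int) ≤ -num_beats := by
          rcases not_and_or.mp hnd with h | h
          · omega
          · omega
        omega,
      List.take_zero]

theorem main_ne (base_note : Int) (scale : List Int) (progression : List Int) (num_beats : Int)
    (hp : progression ≠ [])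
    (hd1 : num_beats < 0) (hd2 : -num_beats < (progression.length : Int)) :
    generate_harmony_py base_note scale progression num_beats ≠
    generate_harmony_py_alt base_note scale progression num_beats := by
  rw [A_char_neg _ _ _ _ hp hd1, B_neg _ _ _ _ hd1]
  intro h
  have := congrArg List.length h
  simp at this
  omega

-- ===== VERDICT (by name: the statement is the Claim_ definition above) =====
theorem generate_harmony_py_spec : Claim_unchanged_generate_harmony_py := by
  intro base_note scale progression num_beats _ hpre
  unfold Spec_generate_harmony_py
  intro hnd
  unfold D_generate_harmony_py at hnd
  exact main_eq base_note scale progression num_beats hpre.1 hnd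
theorem generate_harmony_py_changed : Claim_changed_generate_harmony_py := by
  unfold Claim_changed_generate_harmony_py; decide
theorem generate_harmony_py_tight : Claim_exact_generate_harmony_py := by
  intro base_note scale progression num_beats _ hpre hd
  unfold D_generate_harmony_py at hd
  exact main_ne base_note scale progression num_beats hpre.1 hd.1 hd.2
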